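-- pv_equiv track=rewrite | github.com/wtthornton/HomeIQ | domains/automation-core/ha-ai-agent-service/src/services/skill_learning/skill_extractor.py | _categorize_from_tools
-- ===== SOURCE A (Python) =====
-- def _categorize_from_tools(tool_names: set[str]) -> str:
--     """Map tool names to skill category."""
--     if "create_automation_from_prompt" in tool_names or "preview_automation_from_prompt" in tool_names:
--         return "automation"
--     if any("light" in t for t in tool_names):
--         return "lighting"
--     if any("climate" in t or "temperature" in t for t in tool_names):
--         return "climate"
--     if any("switch" in t for t in tool_names):
--         return "device_control"
--     if any("scene" in t or "script" in t for t in tool_names):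
--         return "scene"
--     return "general"
-- ===== SOURCE B (Python) =====
-- def _categorize_from_tools(tool_names: set[str]) -> str:
--     """Map tool names to skill category: one pass collecting matched categories,
--     then resolve by the fixed priority order."""
--     matched = set()
--     for t in tool_names:
--         if t in ("create_automation_from_prompt", "preview_automation_from_prompt"):
--             matched.add("automation")
--         if "light" in t:
--             matched.add("lighting")
--         if "climate" in t or "temperature" in t:
--             matched.add("climate")
--         if "switch" in t:
--             matched.add("device_control")
--         if "scene" in t or "script" in t:
--             matched.add("scene")
--     for cat in ("automation", "lighting", "climate", "device_control", "scene"):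
--         if cat in matched:
--             return cat
--     return "general"
-- ===== Notes on version B (the rewrite author's own statement) =====
-- stated objective: alternative
-- what changed: Replaces A's up-to-five separate scans of tool_names (each with its own any()/membership test) by a single pass that collects the set of matched categories per tool, followed by a lookup in the fixed priority list.
import Mathlib
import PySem

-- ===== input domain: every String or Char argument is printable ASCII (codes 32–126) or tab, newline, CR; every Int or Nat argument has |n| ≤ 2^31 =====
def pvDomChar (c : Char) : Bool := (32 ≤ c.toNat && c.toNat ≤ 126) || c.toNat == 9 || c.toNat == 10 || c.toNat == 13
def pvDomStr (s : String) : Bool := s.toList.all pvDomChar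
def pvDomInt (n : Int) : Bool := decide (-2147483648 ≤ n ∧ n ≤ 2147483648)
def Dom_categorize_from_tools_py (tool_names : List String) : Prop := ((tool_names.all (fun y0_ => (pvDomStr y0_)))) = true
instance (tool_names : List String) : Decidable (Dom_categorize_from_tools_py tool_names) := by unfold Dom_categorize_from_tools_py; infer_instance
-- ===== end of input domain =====

-- B replaces A's up-to-five separate scans by one pass collecting matched categories plus a priority lookup (alternative decomposition).

-- ===== PORT A =====
def categorize_from_tools_py (tool_names : List String) : String :=
  if tool_names.contains "create_automation_from_prompt" || tool_names.contains "preview_automation_from_prompt" then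
    "automation"
  else if tool_names.any (fun t => PySem.Str.isIn "light" t) then
    "lighting"
  else if tool_names.any (fun t => PySem.Str.isIn "climate" t || PySem.Str.isIn "temperature" t) then
    "climate"
  else if tool_names.any (fun t => PySem.Str.isIn "switch" t) then
    "device_control"
  else if tool_names.any (fun t => PySem.Str.isIn "scene" t || PySem.Str.isIn "script" t) then
    "scene"
  else
    "general"

-- ===== PORT B =====
-- one loop body: add to `matched` every category this tool triggers
def catStep (m : PySem.Set String) (t : String) : PySem.Set String :=
  let m := if t == "create_automation_from_prompt" || t == "preview_automation_from_prompt" then m.add "automation" else m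
  let m := if PySem.Str.isIn "light" t then m.add "lighting" else m
  let m := if PySem.Str.isIn "climate" t || PySem.Str.isIn "temperature" t then m.add "climate" else m
  let m := if PySem.Str.isIn "switch" t then m.add "device_control" else m
  if PySem.Str.isIn "scene" t || PySem.Str.isIn "script" t then m.add "scene" else m

def categorize_from_tools_py_alt (tool_names : List String) : String :=
  let matched := tool_names.foldl catStep PySem.Set.empty
  ((["automation", "lighting", "climate", "device_control", "scene"] : List String).find?
      (fun c => matched.contains c)).getD "general"

-- ===== PRECONDITION & SPEC =====
def Spec_categorize_from_tools_py (tool_names : List String) (out : String) : Prop := out = categorize_from_tools_py_alt tool_names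
instance (tool_names : List String) (out : String) : Decidable (Spec_categorize_from_tools_py tool_names out) := by unfold Spec_categorize_from_tools_py; infer_instance

-- ===== CLAIM (what is proved, stated in full; the proofs are below) =====
def Claim_equal_categorize_from_tools_py : Prop := ∀ (tool_names : List String), Dom_categorize_from_tools_py tool_names → Spec_categorize_from_tools_py tool_names (categorize_from_tools_py tool_names)

-- ===== LEMMAS AND PROOFS =====
set_option maxHeartbeats 1000000

-- which categories a single tool name triggers (proof-side characterisation)
def Trig (c t : String) : Prop :=
  (c = "automation" ∧ (t = "create_automation_from_prompt" ∨ t = "preview_automation_from_prompt"))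
  ∨ (c = "lighting" ∧ PySem.Str.isIn "light" t = true)
  ∨ (c = "climate" ∧ (PySem.Str.isIn "climate" t = true ∨ PySem.Str.isIn "temperature" t = true))
  ∨ (c = "device_control" ∧ PySem.Str.isIn "switch" t = true)
  ∨ (c = "scene" ∧ (PySem.Str.isIn "scene" t = true ∨ PySem.Str.isIn "script" t = true))

theorem mem_catStep (m : PySem.Set String) (t c : String) :
    c ∈ catStep m t ↔ c ∈ m ∨ Trig c t := by
  unfold catStep Trig
  split_ifs <;> simp_all [PySem.Set.mem_add] <;> tauto

theorem mem_foldl_catStep (l : List String) (m : PySem.Set String) (c : String) :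
    c ∈ l.foldl catStep m ↔ c ∈ m ∨ ∃ t ∈ l, Trig c t := by
  induction l generalizing m with
  | nil => simp
  | cons x xs ih =>
    rw [List.foldl_cons, ih, mem_catStep]
    constructor
    · rintro (⟨h | h⟩ | ⟨t, ht, h⟩)
      · exact Or.inl h
      · exact Or.inr ⟨x, by simp, h⟩
      · exact Or.inr ⟨t, by simp [ht], h⟩
    · rintro (h | ⟨t, ht, h⟩)
      · exact Or.inl (Or.inl h)
      · rcases List.mem_cons.mp ht with rfl | ht
        · exact Or.inl (Or.inr h)
        · exact Or.inr ⟨t, ht, h⟩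

-- ===== VERDICT (by name: the statement is the Claim_ definition above) =====
theorem categorize_from_tools_py_spec : Claim_equal_categorize_from_tools_py := by
  intro l _
  unfold Spec_categorize_from_tools_py categorize_from_tools_py categorize_from_tools_py_alt
  have mA : ("automation" ∈ List.foldl catStep PySem.Set.empty l) ↔
      ("create_automation_from_prompt" ∈ l ∨ "preview_automation_from_prompt" ∈ l) := by
    rw [mem_foldl_catStep]; simp [Trig, PySem.Set.empty]
    constructor
    · rintro ⟨t, ht, rfl | rfl⟩
      · exact Or.inl ht
      · exact Or.inr ht
    · rintro (h | h)
      · exact ⟨_, h, Or.inl rfl⟩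
      · exact ⟨_, h, Or.inr rfl⟩
  have mL : ("lighting" ∈ List.foldl catStep PySem.Set.empty l) ↔
      (∃ t ∈ l, PySem.Str.isIn "light" t = true) := by
    rw [mem_foldl_catStep]; simp [Trig, PySem.Set.empty]
  have mC : ("climate" ∈ List.foldl catStep PySem.Set.empty l) ↔
      (∃ t ∈ l, PySem.Str.isIn "climate" t = true ∨ PySem.Str.isIn "temperature" t = true) := by
    rw [mem_foldl_catStep]; simp [Trig, PySem.Set.empty]
  have mD : ("device_control" ∈ List.foldl catStep PySem.Set.empty l) ↔
      (∃ t ∈ l, PySem.Str.isIn "switch" t = true) := by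
    rw [mem_foldl_catStep]; simp [Trig, PySem.Set.empty]
  have mS : ("scene" ∈ List.foldl catStep PySem.Set.empty l) ↔
      (∃ t ∈ l, PySem.Str.isIn "scene" t = true ∨ PySem.Str.isIn "script" t = true) := by
    rw [mem_foldl_catStep]; simp [Trig, PySem.Set.empty]
  simp only [List.find?, PySem.Set.contains_eq_listContains, PySem.Set.empty] at *
  simp [mA, mL, mC, mD, mS]
  by_cases c1 : "create_automation_from_prompt" ∈ l
  all_goals by_cases c2 : "preview_automation_from_prompt" ∈ l
  all_goals by_cases c3 : ∃ x ∈ l, PySem.Chars.isIn ['l', 'i', 'g', 'h', 't'] x.toList = true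
  all_goals by_cases c4 : ∃ x ∈ l, PySem.Chars.isIn ['c', 'l', 'i', 'm', 'a', 't', 'e'] x.toList = true ∨ PySem.Chars.isIn ['t', 'e', 'm', 'p', 'e', 'r', 'a', 't', 'u', 'r', 'e'] x.toList = true
  all_goals by_cases c5 : ∃ x ∈ l, PySem.Chars.isIn ['s', 'w', 'i', 't', 'c', 'h'] x.toList = true
  all_goals by_cases c6 : ∃ x ∈ l, PySem.Chars.isIn ['s', 'c', 'e', 'n', 'e'] x.toList = true ∨ PySem.Chars.isIn ['s', 'c', 'r', 'i', 'p', 't'] x.toList = true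
  all_goals simp [c1, c2, c3, c4, c5, c6]
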